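-- pv_equiv track=rewrite | github.com/uboy/telegram_bot_ai | scripts/rag_eval_quality_gate.py | _build_slice_groups
-- ===== SOURCE A (Python) =====
-- from typing import Any, Dict, List, Optional, Sequence, Tuple
--
-- def _canonicalize_slice_name(value: str) -> str:
--     token = str(value or "").strip().lower()
--     if not token:
--         return ""
--     token = token.replace(" ", "_")
--     aliases = {
--         "long_context": "long-context",
--         "refusal_expected": "refusal-expected",
--         "direct_prompt_injection": "direct_injection",
--         "indirect_prompt_injection": "indirect_injection",
--     }
--     return aliases.get(token, token)
--
-- def _build_slice_groups(required_slices: Sequence[str], metrics: Optional[Dict[str, Any]] = None) -> Dict[str, List[str]]: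
--     metrics_obj = metrics if isinstance(metrics, dict) else {}
--     source_family_set = {
--         _canonicalize_slice_name(str(item))
--         for item in (metrics_obj.get("source_families") or [])
--         if _canonicalize_slice_name(str(item))
--     }
--     security_set = {
--         _canonicalize_slice_name(str(item))
--         for item in (metrics_obj.get("security_scenarios") or [])
--         if _canonicalize_slice_name(str(item))
--     }
--     failure_mode_set = {
--         _canonicalize_slice_name(str(item))
--         for item in (metrics_obj.get("failure_modes") or [])
--         if _canonicalize_slice_name(str(item))
--     }
--     grouped = {
--         "source_families": [slice_name for slice_name in required_slices if slice_name in source_family_set],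
--         "security_scenarios": [slice_name for slice_name in required_slices if slice_name in security_set],
--         "failure_modes": [slice_name for slice_name in required_slices if slice_name in failure_mode_set],
--         "other": [
--             slice_name
--             for slice_name in required_slices
--             if (
--                 slice_name not in source_family_set
--                 and slice_name not in security_set
--                 and slice_name not in failure_mode_set
--             )
--         ],
--     }
--     return grouped
-- ===== SOURCE B (Python) =====
-- from typing import Any, Dict, List, Optional, Sequence
--
-- def _canonicalize_slice_name(value: str) -> str:
--     token = str(value or "").strip().lower()
--     if not token:
--         return ""
--     token = token.replace(" ", "_")
--     aliases = {
--         "long_context": "long-context",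
--         "refusal_expected": "refusal-expected",
--         "direct_prompt_injection": "direct_injection",
--         "indirect_prompt_injection": "indirect_injection",
--     }
--     return aliases.get(token, token)
--
-- def _canon_set(items):
--     return {
--         _canonicalize_slice_name(str(item))
--         for item in (items or [])
--         if _canonicalize_slice_name(str(item))
--     }
--
-- def _build_slice_groups(required_slices: Sequence[str], metrics: Optional[Dict[str, Any]] = None) -> Dict[str, List[str]]:
--     metrics_obj = metrics if isinstance(metrics, dict) else {}
--     source_family_set = _canon_set(metrics_obj.get("source_families"))
--     security_set = _canon_set(metrics_obj.get("security_scenarios"))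
--     failure_mode_set = _canon_set(metrics_obj.get("failure_modes"))
--     source_families: List[str] = []
--     security_scenarios: List[str] = []
--     failure_modes: List[str] = []
--     other: List[str] = []
--     for slice_name in required_slices:
--         matched = False
--         if slice_name in source_family_set:
--             source_families.append(slice_name)
--             matched = True
--         if slice_name in security_set:
--             security_scenarios.append(slice_name)
--             matched = True
--         if slice_name in failure_mode_set:
--             failure_modes.append(slice_name)
--             matched = True
--         if not matched:
--             other.append(slice_name)
--     return {
--         "source_families": source_families,
--         "security_scenarios": security_scenarios,
--         "failure_modes": failure_modes,
--         "other": other,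
--     }
-- ===== Notes on version B (the rewrite author's own statement) =====
-- stated objective: alternative
-- what changed: A's four separate list comprehensions over required_slices (one per group) are replaced by a single loop that appends each slice to every matching group and, via a matched flag, to 'other' when none matched.
import Mathlib
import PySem

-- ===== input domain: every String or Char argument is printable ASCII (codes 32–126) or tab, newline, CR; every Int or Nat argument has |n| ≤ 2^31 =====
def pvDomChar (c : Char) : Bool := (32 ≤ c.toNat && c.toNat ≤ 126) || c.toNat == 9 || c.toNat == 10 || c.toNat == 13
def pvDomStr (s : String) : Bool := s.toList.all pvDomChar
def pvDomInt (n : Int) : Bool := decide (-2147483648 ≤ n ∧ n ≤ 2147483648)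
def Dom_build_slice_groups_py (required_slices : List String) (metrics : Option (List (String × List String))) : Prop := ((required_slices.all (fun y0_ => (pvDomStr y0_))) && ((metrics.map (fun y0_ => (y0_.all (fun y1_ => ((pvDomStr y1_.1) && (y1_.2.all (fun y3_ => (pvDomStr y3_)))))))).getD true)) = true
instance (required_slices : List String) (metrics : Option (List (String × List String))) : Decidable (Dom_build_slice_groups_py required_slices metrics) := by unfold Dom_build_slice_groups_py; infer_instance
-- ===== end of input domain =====

-- B replaces A's four list comprehensions over required_slices by a single loop appending each
-- slice to every matching group (objective: alternative decomposition, same cost).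

-- ===== PORT A =====
-- _canonicalize_slice_name (shared module-level helper, used verbatim by A and B)
def pvCanon (value : String) : String :=
  let token := PySem.Str.lower (PySem.Str.strip value)
  if token = "" then ""
  else
    let token := PySem.Str.replace token " " "_"
    PySem.Dict.getD
      (PySem.Dict.ofList [("long_context", "long-context"),
                          ("refusal_expected", "refusal-expected"),
                          ("direct_prompt_injection", "direct_injection"),
                          ("indirect_prompt_injection", "indirect_injection")])
      token token

-- metrics_obj.get(key) or []  (metrics_obj = {} when metrics is None)
def pvGetList (metrics : Option (List (String × List String))) (k : String) : List String :=
  match metrics with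
  | none => []
  | some m =>
    match m.find? (fun p => p.1 == k) with
    | some p => p.2
    | none => []

-- { _canonicalize_slice_name(str(item)) for item in items if _canonicalize_slice_name(str(item)) }
def pvCanonSet (items : List String) : PySem.Set String :=
  PySem.Set.ofList ((items.map pvCanon).filter (fun s => s ≠ ""))

def build_slice_groups_py (required_slices : List String) (metrics : Option (List (String × List String))) : List (String × List String) :=
  let source_family_set := pvCanonSet (pvGetList metrics "source_families")
  let security_set := pvCanonSet (pvGetList metrics "security_scenarios")
  let failure_mode_set := pvCanonSet (pvGetList metrics "failure_modes")
  [("source_families", required_slices.filter (fun s => PySem.Set.contains source_family_set s)),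
   ("security_scenarios", required_slices.filter (fun s => PySem.Set.contains security_set s)),
   ("failure_modes", required_slices.filter (fun s => PySem.Set.contains failure_mode_set s)),
   ("other", required_slices.filter (fun s =>
      !(PySem.Set.contains source_family_set s)
      && !(PySem.Set.contains security_set s)
      && !(PySem.Set.contains failure_mode_set s)))]

-- ===== PORT B =====
-- one loop over required_slices; the accumulator is the four groups plus the 'matched' flag logic
def pvStep (sf sec fm : PySem.Set String)
    (acc : List String × List String × List String × List String) (s : String) :
    List String × List String × List String × List String :=
  let m1 := PySem.Set.contains sf s
  let m2 := PySem.Set.contains sec s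
  let m3 := PySem.Set.contains fm s
  (if m1 then acc.1 ++ [s] else acc.1,
   if m2 then acc.2.1 ++ [s] else acc.2.1,
   if m3 then acc.2.2.1 ++ [s] else acc.2.2.1,
   if !(m1 || m2 || m3) then acc.2.2.2 ++ [s] else acc.2.2.2)

def build_slice_groups_py_alt (required_slices : List String) (metrics : Option (List (String × List String))) : List (String × List String) :=
  let source_family_set := pvCanonSet (pvGetList metrics "source_families")
  let security_set := pvCanonSet (pvGetList metrics "security_scenarios")
  let failure_mode_set := pvCanonSet (pvGetList metrics "failure_modes")
  let acc := required_slices.foldl (pvStep source_family_set security_set failure_mode_set)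
    ([], [], [], [])
  [("source_families", acc.1),
   ("security_scenarios", acc.2.1),
   ("failure_modes", acc.2.2.1),
   ("other", acc.2.2.2)]

-- ===== PRECONDITION & SPEC =====
def Spec_build_slice_groups_py (required_slices : List String) (metrics : Option (List (String × List String))) (out : List (String × List String)) : Prop := out = build_slice_groups_py_alt required_slices metrics
instance (required_slices : List String) (metrics : Option (List (String × List String))) (out : List (String × List String)) : Decidable (Spec_build_slice_groups_py required_slices metrics out) := by unfold Spec_build_slice_groups_py; infer_instance

-- ===== CLAIM (what is proved, stated in full; the proofs are below) =====
def Claim_equal_build_slice_groups_py : Prop := ∀ (required_slices : List String) (metrics : Option (List (String × List String))), Dom_build_slice_groups_py required_slices metrics → Spec_build_slice_groups_py required_slices metrics (build_slice_groups_py required_slices metrics)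

-- ===== LEMMAS AND PROOFS =====
-- the one-pass fold computes the four filters
theorem pvStep_foldl (sf sec fm : PySem.Set String) (l : List String)
    (a b c d : List String) :
    l.foldl (pvStep sf sec fm) (a, b, c, d) =
      (a ++ l.filter (fun s => PySem.Set.contains sf s),
       b ++ l.filter (fun s => PySem.Set.contains sec s),
       c ++ l.filter (fun s => PySem.Set.contains fm s),
       d ++ l.filter (fun s =>
         !(PySem.Set.contains sf s) && !(PySem.Set.contains sec s)
         && !(PySem.Set.contains fm s))) := by
  induction l generalizing a b c d with
  | nil => simp
  | cons x xs ih =>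
    simp only [List.foldl_cons, pvStep, ih, List.filter_cons]
    by_cases h1 : x ∈ sf <;>
      by_cases h2 : x ∈ sec <;>
        by_cases h3 : x ∈ fm <;>
          simp [h1, h2, h3]

-- ===== VERDICT (by name: the statement is the Claim_ definition above) =====
theorem build_slice_groups_py_spec : Claim_equal_build_slice_groups_py := by
  intro rs metrics _
  show _ = _
  simp only [build_slice_groups_py, build_slice_groups_py_alt, pvStep_foldl, List.nil_append]
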